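-- pv_equiv track=rewrite | github.com/gmnr/advent-of-code | 2018/04/day04.py | turnize
-- ===== SOURCE A (Python) =====
-- def turnize(data):
--     turns = []
--     turn = []
--     for r in data:
--         if "begins" in r:
--             turns.append(turn)
--             turn = [r]
--         else:
--             turn.append(r)
--     turns.append(turn)
--     return turns[1:]
-- ===== SOURCE B (Python) =====
-- def turnize(data):
--     n = len(data)
--     # skip the records before the first "begins" marker
--     i = 0
--     while i < n and "begins" not in data[i]:
--         i += 1
--     # each group starts at a marker and runs until the next marker
--     out = []
--     while i < n:
--         j = i + 1
--         while j < n and "begins" not in data[j]: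
--             j += 1
--         out.append(data[i:j])
--         i = j
--     return out
-- ===== Notes on version B (the rewrite author's own statement) =====
-- stated objective: idiomatic
-- what changed: Replaces A's accumulate-and-flush state machine (with a dummy first group sliced off at the end) by a direct skip-then-group scan: skip records before the first 'begins' marker, then emit each slice from one marker up to the next.
import Mathlib
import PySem

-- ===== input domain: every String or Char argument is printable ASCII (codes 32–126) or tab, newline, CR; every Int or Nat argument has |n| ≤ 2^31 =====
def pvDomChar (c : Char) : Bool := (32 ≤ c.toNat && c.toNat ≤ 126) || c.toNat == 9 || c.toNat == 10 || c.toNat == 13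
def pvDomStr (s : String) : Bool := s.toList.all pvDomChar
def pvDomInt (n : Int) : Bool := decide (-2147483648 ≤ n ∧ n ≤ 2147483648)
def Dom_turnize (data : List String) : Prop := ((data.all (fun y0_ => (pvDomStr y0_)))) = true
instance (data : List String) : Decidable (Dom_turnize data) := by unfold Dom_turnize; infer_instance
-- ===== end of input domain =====

-- B replaces A's accumulate-and-flush state machine by a skip-then-group scan (idiomatic; same cost).


-- "begins" in r
def pvBegins (r : String) : Bool := PySem.Str.isIn "begins" r

-- ===== PORT A =====
-- state = (turns, turn); at the end append the pending turn and drop the dummy first group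
def pvStepA (st : List (List String) × List String) (r : String) : List (List String) × List String :=
  if pvBegins r then (st.1 ++ [st.2], [r]) else (st.1, st.2 ++ [r])

def turnize (data : List String) : List (List String) :=
  let s := data.foldl pvStepA ([], [])
  (s.1 ++ [s.2]).drop 1

-- ===== PORT B =====
-- the inner while loop: group = rest[i:j] where j is the next marker (= head plus takeWhile not-begins)
def pvGroups : List String → List (List String)
  | [] => []
  | x :: rest =>
      (x :: rest.takeWhile (fun r => !pvBegins r)) :: pvGroups (rest.dropWhile (fun r => !pvBegins r))
termination_by xs => xs.length
decreasing_by
  simp only [List.length_cons]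
  exact Nat.lt_succ_of_le (List.length_dropWhile_le _ _)

-- first while loop skips the prefix before the first marker, then groups are emitted marker to marker
def turnize_alt (data : List String) : List (List String) :=
  pvGroups (data.dropWhile (fun r => !pvBegins r))

-- ===== PRECONDITION & SPEC =====
def Spec_turnize (data : List String) (out : List (List String)) : Prop := out = turnize_alt data
instance (data : List String) (out : List (List String)) : Decidable (Spec_turnize data out) := by unfold Spec_turnize; infer_instance

-- ===== CLAIM (what is proved, stated in full; the proofs are below) =====
def Claim_equal_turnize : Prop := ∀ (data : List String), Dom_turnize data → Spec_turnize data (turnize data)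

-- ===== LEMMAS AND PROOFS =====

-- A's step only ever appends at the right end of the finished-turns list
theorem pvFold_prefix (data : List String) (ts : List (List String)) (t : List String) :
    data.foldl pvStepA (ts, t) =
      (ts ++ (data.foldl pvStepA ([], t)).1, (data.foldl pvStepA ([], t)).2) := by
  induction data generalizing ts t with
  | nil => simp
  | cons r rs ih =>
      simp only [List.foldl_cons, pvStepA]
      by_cases h : pvBegins r = true
      · rw [if_pos h, if_pos h]
        simp only [List.nil_append]
        rw [ih (ts ++ [t]) [r], ih [t] [r]]
        simp
      · rw [if_neg h, if_neg h]
        exact ih ts (t ++ [r])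

-- the fold's final turns-plus-pending list, started with pending turn t
theorem pvFold_groups (data : List String) (t : List String) :
    (data.foldl pvStepA ([], t)).1 ++ [(data.foldl pvStepA ([], t)).2] =
      (t ++ data.takeWhile (fun r => !pvBegins r)) ::
        pvGroups (data.dropWhile (fun r => !pvBegins r)) := by
  induction data generalizing t with
  | nil => simp [pvGroups]
  | cons r rs ih =>
      simp only [List.foldl_cons, pvStepA]
      by_cases h : pvBegins r = true
      · rw [if_pos h]
        simp only [List.nil_append]
        rw [pvFold_prefix rs [t] [r]]
        simp only [List.append_assoc, List.cons_append, List.nil_append]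
        rw [ih [r]]
        simp [List.dropWhile_cons, h, pvGroups]
      · rw [if_neg h]
        rw [ih (t ++ [r])]
        simp [List.takeWhile_cons, h]

-- ===== VERDICT (by name: the statement is the Claim_ definition above) =====
theorem turnize_spec : Claim_equal_turnize := by
  intro data _
  show turnize data = turnize_alt data
  unfold turnize turnize_alt
  simp only []
  rw [pvFold_groups data []]
  simp
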